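-- pv_equiv track=rewrite | github.com/Edinburgh-Genome-Foundry/Examples | SeqDistance/seqdistance.py | make_letter_to_letter_matches
-- ===== SOURCE A (Python) =====
-- def make_letter_to_letter_matches(code_to_nt):
--     letter_to_letter_matches = {}
--     for code, matches in code_to_nt.items():
--         letter_to_letter_matches[code] = set(code)
--         for key, value in code_to_nt.items():
--             if value & matches != set():
--                 letter_to_letter_matches[code] = letter_to_letter_matches[code] | set(
--                     key
--                 )
--
--     return letter_to_letter_matches
-- ===== SOURCE B (Python) =====
-- def make_letter_to_letter_matches(code_to_nt):
--     # Invert the table once: nucleotide -> indices of the codes containing it,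
--     # then each code's match set is the union over its own nucleotides.
--     nt_to_idxs = {}
--     for i, (code, matches) in enumerate(code_to_nt.items()):
--         for nt in matches:
--             nt_to_idxs.setdefault(nt, []).append(i)
--     codes = list(code_to_nt)
--     letter_to_letter_matches = {}
--     for code, matches in code_to_nt.items():
--         hit = set()
--         for nt in matches:
--             hit.update(nt_to_idxs[nt])
--         letters = set(code)
--         for j in sorted(hit):
--             letters = letters | set(codes[j])
--         letter_to_letter_matches[code] = letters
--     return letter_to_letter_matches
-- ===== Notes on version B (the rewrite author's own statement) =====
-- stated objective: faster
-- what changed: Instead of intersecting every code's nucleotide set with every other code's set (all-pairs scan), B builds an inverted index nucleotide->code indices once and unions, per code, only the codes hit through its own nucleotides (sorted by index to keep input order).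
import Mathlib
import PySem

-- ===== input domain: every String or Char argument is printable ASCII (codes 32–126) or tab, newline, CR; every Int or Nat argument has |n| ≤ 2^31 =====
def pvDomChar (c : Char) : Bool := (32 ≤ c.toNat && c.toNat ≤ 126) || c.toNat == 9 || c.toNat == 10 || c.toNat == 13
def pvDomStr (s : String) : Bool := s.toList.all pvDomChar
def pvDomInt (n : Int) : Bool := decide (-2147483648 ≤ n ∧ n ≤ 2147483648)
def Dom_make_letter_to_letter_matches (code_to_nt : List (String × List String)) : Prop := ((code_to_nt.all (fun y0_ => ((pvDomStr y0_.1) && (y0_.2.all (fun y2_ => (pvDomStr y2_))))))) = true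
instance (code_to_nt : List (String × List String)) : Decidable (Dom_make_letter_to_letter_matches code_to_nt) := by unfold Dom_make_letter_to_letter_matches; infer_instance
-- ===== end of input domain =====

-- B inverts the table once (nucleotide -> code indices) and unions, per code, only the
-- codes reached through its own nucleotides, instead of A's all-pairs intersection scan.

-- set(s) for a Python string s: the set of its one-character strings
def pyCharSet (s : String) : PySem.Set String :=
  PySem.Set.ofList (s.toList.map (fun c => String.ofList [c]))

-- ===== PORT A =====
def make_letter_to_letter_matches (code_to_nt : List (String × List String)) : List (String × List String) :=
  (code_to_nt.foldl
    (fun d p =>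
      code_to_nt.foldl
        (fun d2 q =>
          if PySem.Set.inter (PySem.Set.ofList q.2) (PySem.Set.ofList p.2) ≠ ([] : List String) then
            -- letter_to_letter_matches[code] is always present here (just inserted): getD's default is never read
            d2.insert p.1 (PySem.Set.union (d2.getD p.1 []) (pyCharSet q.1))
          else d2)
        (d.insert p.1 (pyCharSet p.1)))
    (PySem.Dict.empty : PySem.Dict String (List String))).items

-- ===== PORT B =====
def make_letter_to_letter_matches_alt (code_to_nt : List (String × List String)) : List (String × List String) :=
  let nt_to_idxs : PySem.Dict String (List Int) :=
    (PySem.List.enumerate code_to_nt 0).foldl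
      (fun d ip => (PySem.Set.ofList ip.2.2).foldl (fun d2 nt => d2.modify nt [] (· ++ [ip.1])) d)
      PySem.Dict.empty
  let codes := code_to_nt.map (·.1)
  (code_to_nt.foldl
    (fun res p =>
      let hit : PySem.Set Int :=
        (PySem.Set.ofList p.2).foldl (fun s nt => PySem.Set.update s (nt_to_idxs.getD nt [])) PySem.Set.empty
      let letters :=
        (PySem.List.sorted hit (fun j => j) false).foldl
          -- codes[j]: j is a stored index, provably in range; the "" default is never read
          (fun a j => PySem.Set.union a (pyCharSet ((PySem.List.pyGet? codes j).getD "")))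
          (pyCharSet p.1)
      res.insert p.1 letters)
    (PySem.Dict.empty : PySem.Dict String (List String))).items

-- ===== PRECONDITION & SPEC =====
def Spec_make_letter_to_letter_matches (code_to_nt : List (String × List String)) (out : List (String × List String)) : Prop := out = make_letter_to_letter_matches_alt code_to_nt
instance (code_to_nt : List (String × List String)) (out : List (String × List String)) : Decidable (Spec_make_letter_to_letter_matches code_to_nt out) := by unfold Spec_make_letter_to_letter_matches; infer_instance

-- ===== CLAIM (what is proved, stated in full; the proofs are below) =====
def Claim_equal_make_letter_to_letter_matches : Prop := ∀ (code_to_nt : List (String × List String)), Dom_make_letter_to_letter_matches code_to_nt → Spec_make_letter_to_letter_matches code_to_nt (make_letter_to_letter_matches code_to_nt)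

-- ===== LEMMAS AND PROOFS =====

-- A's inner loop only ever rewrites the entry at `c`: it collapses to one insert of a folded set
lemma pvInnerA (L : List (String × List String)) (m : List String) (c : String) :
    ∀ (d : PySem.Dict String (List String)) (s : List String),
    L.foldl (fun d2 q => if PySem.Set.inter (PySem.Set.ofList q.2) (PySem.Set.ofList m) ≠ ([] : List String) then d2.insert c (PySem.Set.union (d2.getD c []) (pyCharSet q.1)) else d2) (d.insert c s)
    = d.insert c (L.foldl (fun a q => if PySem.Set.inter (PySem.Set.ofList q.2) (PySem.Set.ofList m) ≠ ([] : List String) then PySem.Set.union a (pyCharSet q.1) else a) s) := by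
  induction L with
  | nil => intro d s; rfl
  | cons q L ih =>
    intro d s
    simp only [List.foldl_cons]
    split_ifs with h
    · rw [PySem.Dict.getD_insert_self, PySem.Dict.insert_insert_self]; exact ih d _
    · exact ih d s

-- canonical form of port A: one insert per code
lemma pvA_canon (l : List (String × List String)) :
    make_letter_to_letter_matches l
    = (l.foldl (fun d p => d.insert p.1
        (l.foldl (fun a q => if PySem.Set.inter (PySem.Set.ofList q.2) (PySem.Set.ofList p.2) ≠ ([] : List String) then PySem.Set.union a (pyCharSet q.1) else a) (pyCharSet p.1)))
        (PySem.Dict.empty : PySem.Dict String (List String))).items := by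
  unfold make_letter_to_letter_matches
  congr 1
  apply PySem.List.foldl_congr_mem
  intro d p _
  exact pvInnerA l p.2 p.1 d (pyCharSet p.1)

-- B's inverted index, named for the lemmas below (same term as in the port)
def pvNtIdx (l : List (String × List String)) : PySem.Dict String (List Int) :=
  (PySem.List.enumerate l 0).foldl
    (fun d ip => (PySem.Set.ofList ip.2.2).foldl (fun d2 nt => d2.modify nt [] (· ++ [ip.1])) d)
    PySem.Dict.empty

lemma pvNtIdx_getD (l : List (String × List String)) (nt : String) :
    (pvNtIdx l).getD nt []
    = (((PySem.List.enumerate l 0).flatMap (fun ip => (PySem.Set.ofList ip.2.2).map (fun x => (x, ip.1)))).filter (fun pr => pr.1 == nt)).map (·.2) := by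
  have h : pvNtIdx l
      = ((PySem.List.enumerate l 0).flatMap (fun ip => (PySem.Set.ofList ip.2.2).map (fun x => (x, ip.1)))).foldl
          (fun d pr => d.modify pr.1 [] (· ++ [pr.2])) PySem.Dict.empty := by
    unfold pvNtIdx
    rw [List.foldl_flatMap]
    apply PySem.List.foldl_congr_mem
    intro d ip _
    rw [List.foldl_map]
  rw [h, PySem.Dict.getD_foldl_modify_append]
  simp [PySem.Dict.getD_empty]

lemma pvMem_ntIdx (l : List (String × List String)) (nt : String) (j : Int) :
    j ∈ (pvNtIdx l).getD nt [] ↔ ∃ ip ∈ PySem.List.enumerate l 0, nt ∈ ip.2.2 ∧ j = ip.1 := by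
  rw [pvNtIdx_getD]
  simp only [List.mem_map, List.mem_filter, List.mem_flatMap, PySem.Set.mem_ofList, beq_iff_eq]
  constructor
  · rintro ⟨⟨x, i⟩, ⟨⟨ip, hip, ⟨y, hy, heq⟩⟩, hx⟩, hj⟩
    cases heq; cases hx
    exact ⟨ip, hip, hy, hj.symm⟩
  · rintro ⟨ip, hip, hnt, hj⟩
    exact ⟨(nt, ip.1), ⟨⟨ip, hip, ⟨nt, hnt, rfl⟩⟩, rfl⟩, hj.symm⟩

lemma pvMem_foldl_update (L : List String) (g : String → List Int) (s0 : PySem.Set Int) (j : Int) :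
    j ∈ L.foldl (fun s nt => PySem.Set.update s (g nt)) s0 ↔ j ∈ s0 ∨ ∃ nt ∈ L, j ∈ g nt := by
  induction L generalizing s0 with
  | nil => simp
  | cons nt L ih =>
    simp only [List.foldl_cons, ih, PySem.Set.mem_update, List.mem_cons]
    constructor
    · rintro ((h | h) | ⟨x, hx, hj⟩)
      · exact Or.inl h
      · exact Or.inr ⟨nt, Or.inl rfl, h⟩
      · exact Or.inr ⟨x, Or.inr hx, hj⟩
    · rintro (h | ⟨x, (rfl | hx), hj⟩)
      · exact Or.inl (Or.inl h)
      · exact Or.inl (Or.inr hj)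
      · exact Or.inr ⟨x, hx, hj⟩

lemma pvNodup_foldl_update (L : List String) (g : String → List Int) (s0 : PySem.Set Int)
    (h : s0.Nodup) : (L.foldl (fun s nt => PySem.Set.update s (g nt)) s0).Nodup := by
  induction L generalizing s0 with
  | nil => exact h
  | cons nt L ih => exact ih _ (PySem.Set.nodup_update _ _ h)

-- the indices of the rows whose nucleotide set meets m, in increasing order
def pvMatchIdx (l : List (String × List String)) (m : List String) : List Int :=
  ((PySem.List.enumerate l 0).filter
    (fun ip => decide (PySem.Set.inter (PySem.Set.ofList ip.2.2) (PySem.Set.ofList m) ≠ ([] : List String)))).map (·.1)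

lemma pvMatchIdx_pairwise (l : List (String × List String)) (m : List String) :
    (pvMatchIdx l m).Pairwise (· < ·) := by
  unfold pvMatchIdx
  rw [List.pairwise_map]
  exact (PySem.List.pairwise_lt_enumerate l 0).filter _

lemma pvInter_ne_nil (v m : List String) :
    PySem.Set.inter (PySem.Set.ofList v) (PySem.Set.ofList m) ≠ ([] : List String) ↔ ∃ x, x ∈ v ∧ x ∈ m := by
  rw [Ne, List.eq_nil_iff_forall_not_mem]
  push Not
  simp [PySem.Set.mem_inter, PySem.Set.mem_ofList]

-- sorted(hit) is exactly the increasing list of matching row indices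
lemma pvSorted_hit (l : List (String × List String)) (m : List String) :
    PySem.List.sorted
      ((PySem.Set.ofList m).foldl (fun s nt => PySem.Set.update s ((pvNtIdx l).getD nt [])) PySem.Set.empty)
      (fun j => j) false
    = pvMatchIdx l m := by
  apply PySem.List.sorted_eq_of_perm_of_pairwise_lt
  · refine (List.perm_ext_iff_of_nodup ((pvMatchIdx_pairwise l m).imp (fun h => ne_of_lt h))
      (pvNodup_foldl_update _ _ _ List.nodup_nil)).mpr ?_
    intro j
    rw [pvMem_foldl_update]
    unfold pvMatchIdx
    simp only [List.mem_map, List.mem_filter, decide_eq_true_eq, pvInter_ne_nil,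
      pvMem_ntIdx, PySem.Set.mem_ofList]
    simp only [List.not_mem_nil, false_or]
    constructor
    · rintro ⟨ip, ⟨hip, x, hv, hm⟩, hj⟩
      exact ⟨x, hm, ip, hip, hv, hj.symm⟩
    · rintro ⟨nt, hm, ip, hip, hv, hj⟩
      exact ⟨ip, ⟨hip, nt, hv, hm⟩, hj.symm⟩
  · exact pvMatchIdx_pairwise l m

-- folding the char-set unions over the matching indices is A's filtered inner scan
lemma pvFoldEnum (cs : List String) (P : (String × List String) → Prop) [DecidablePred P] :
    ∀ (l : List (String × List String)) (s : Int) (a0 : List String),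
    (∀ (k : Nat), (hk : k < l.length) → PySem.List.pyGet? cs (s + k) = some (l[k].1)) →
    (((PySem.List.enumerate l s).filter (fun ip => decide (P ip.2))).map (·.1)).foldl
        (fun a j => PySem.Set.union a (pyCharSet ((PySem.List.pyGet? cs j).getD ""))) a0
    = l.foldl (fun a q => if P q then PySem.Set.union a (pyCharSet q.1) else a) a0 := by
  intro l
  induction l with
  | nil => intro s a0 _; rfl
  | cons q L ih =>
    intro s a0 hcs
    rw [PySem.List.enumerate_cons, List.filter_cons]
    have h0 : PySem.List.pyGet? cs ((s, q).1) = some q.1 := by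
      have := hcs 0 (by simp)
      simpa using this
    have hrest : ∀ (k : Nat), (hk : k < L.length) → PySem.List.pyGet? cs ((s + 1) + k) = some (L[k].1) := by
      intro k hk
      have := hcs (k + 1) (by simpa using Nat.succ_lt_succ hk)
      simpa [add_assoc, add_comm, add_left_comm] using this
    by_cases hP : P q
    · simp only [hP, decide_true, if_true, List.map_cons, List.foldl_cons, h0, Option.getD_some]
      exact ih (s + 1) _ hrest
    · simp only [hP, decide_false, if_false, List.foldl_cons]
      exact ih (s + 1) _ hrest

lemma pvFold_matchIdx (l : List (String × List String)) (m : List String) (a0 : List String) :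
    (pvMatchIdx l m).foldl
      (fun a j => PySem.Set.union a (pyCharSet ((PySem.List.pyGet? (l.map (·.1)) j).getD "")))
      a0
    = l.foldl (fun a q => if PySem.Set.inter (PySem.Set.ofList q.2) (PySem.Set.ofList m) ≠ ([] : List String) then PySem.Set.union a (pyCharSet q.1) else a) a0 := by
  apply pvFoldEnum (l.map (·.1))
    (fun q => PySem.Set.inter (PySem.Set.ofList q.2) (PySem.Set.ofList m) ≠ ([] : List String))
    l 0 a0
  intro k hk
  have : ((0 : Int) + k) = ((k : Nat) : Int) := by omega
  rw [this, PySem.List.pyGet?_natCast]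
  simp [hk]

-- per code: B's union over sorted hit indices equals A's inner scan
lemma pvPerCode (l : List (String × List String)) (m : List String) (a0 : List String) :
    (PySem.List.sorted
        ((PySem.Set.ofList m).foldl (fun s nt => PySem.Set.update s ((pvNtIdx l).getD nt [])) PySem.Set.empty)
        (fun j => j) false).foldl
      (fun a j => PySem.Set.union a (pyCharSet ((PySem.List.pyGet? (l.map (·.1)) j).getD ""))) a0
    = l.foldl (fun a q => if PySem.Set.inter (PySem.Set.ofList q.2) (PySem.Set.ofList m) ≠ ([] : List String) then PySem.Set.union a (pyCharSet q.1) else a) a0 := by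
  rw [pvSorted_hit, pvFold_matchIdx]

-- ===== VERDICT (by name: the statement is the Claim_ definition above) =====
theorem make_letter_to_letter_matches_spec : Claim_equal_make_letter_to_letter_matches := by
  intro l _
  show make_letter_to_letter_matches l = make_letter_to_letter_matches_alt l
  rw [pvA_canon l]
  show _ = (l.foldl (fun res p => res.insert p.1
      ((PySem.List.sorted
          ((PySem.Set.ofList p.2).foldl (fun s nt => PySem.Set.update s ((pvNtIdx l).getD nt [])) PySem.Set.empty)
          (fun j => j) false).foldl
        (fun a j => PySem.Set.union a (pyCharSet ((PySem.List.pyGet? (l.map (·.1)) j).getD ""))) (pyCharSet p.1)))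
      (PySem.Dict.empty : PySem.Dict String (List String))).items
  congr 1
  apply PySem.List.foldl_congr_mem
  intro d p _
  rw [pvPerCode]
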